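-- pv_equiv track=rewrite | github.com/Perezh02/mycode | my_projects/FrozenMiniPro.py | determine_result
-- ===== SOURCE A (Python) =====
-- results = {
--     "Elsa": ["Building a snowman", "Ice and snow powers like Elsa"],
--     "Anna": ["Optimistic and curious like Anna", "Let It Go from Frozen"],
--     "Olaf": ["Playful and carefree like Olaf", "Drinking hot cocoa"],
--     "Kristoff": ["Loyal and dependable like Kristoff", "Telekinesis like Violet from The Incredibles"],
-- }
--
-- def determine_result(user_answers):
--     match_counts = {result: 0 for result in results}
--     for result, answers in results.items():
--         for answer in user_answers:
--             if answer in answers: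
--                 match_counts[result] += 1
--     max_count = max(match_counts.values())
--     possible_results = [result for result, count in match_counts.items() if count == max_count]
--     return possible_results
-- ===== SOURCE B (Python) =====
-- results = {
--     "Elsa": ["Building a snowman", "Ice and snow powers like Elsa"],
--     "Anna": ["Optimistic and curious like Anna", "Let It Go from Frozen"],
--     "Olaf": ["Playful and carefree like Olaf", "Drinking hot cocoa"],
--     "Kristoff": ["Loyal and dependable like Kristoff", "Telekinesis like Violet from The Incredibles"],
-- }
--
-- _ANSWER_TO_RESULT = {answer: result for result, answers in results.items() for answer in answers}
--
-- def determine_result(user_answers):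
--     hits = [_ANSWER_TO_RESULT[a] for a in user_answers if a in _ANSWER_TO_RESULT]
--     scores = [(name, hits.count(name)) for name in results]
--     best = max(count for _, count in scores)
--     return [name for name, count in scores if count == best]
-- ===== Notes on version B (the rewrite author's own statement) =====
-- stated objective: faster
-- what changed: Replaces A's nested per-result scans of user_answers with a precomputed answer-to-result reverse index, one pass over user_answers collecting matched result names, and per-result counts taken from that hit list.
import Mathlib
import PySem

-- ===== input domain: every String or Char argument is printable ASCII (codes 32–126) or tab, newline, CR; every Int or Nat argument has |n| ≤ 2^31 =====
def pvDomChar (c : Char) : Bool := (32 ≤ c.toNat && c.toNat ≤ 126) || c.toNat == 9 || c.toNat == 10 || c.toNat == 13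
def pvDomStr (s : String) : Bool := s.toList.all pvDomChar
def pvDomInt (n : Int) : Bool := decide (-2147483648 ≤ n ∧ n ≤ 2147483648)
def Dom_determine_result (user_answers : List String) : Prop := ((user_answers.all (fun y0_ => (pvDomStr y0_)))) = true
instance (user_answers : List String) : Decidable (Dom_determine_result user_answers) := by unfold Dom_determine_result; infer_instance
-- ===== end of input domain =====

-- B replaces A's per-result nested scans of user_answers with an answer→result reverse
-- index, one pass over user_answers collecting matched result names, and per-result
-- counts of that hit list (measured faster by a constant factor).

-- the module-level constant `results` (shared by Source A and Source B)
-- the four answer lists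
def ansE : List String := ["Building a snowman", "Ice and snow powers like Elsa"]
def ansA : List String := ["Optimistic and curious like Anna", "Let It Go from Frozen"]
def ansO : List String := ["Playful and carefree like Olaf", "Drinking hot cocoa"]
def ansK : List String := ["Loyal and dependable like Kristoff", "Telekinesis like Violet from The Incredibles"]

def resultsData : List (String × List String) :=
  [("Elsa", ansE), ("Anna", ansA), ("Olaf", ansO), ("Kristoff", ansK)]

-- ===== PORT A =====
def determine_result (user_answers : List String) : List String :=
  -- match_counts = {result: 0 for result in results}
  let match_counts : PySem.Dict String Int :=
    resultsData.foldl (fun d p => d.insert p.1 0) PySem.Dict.empty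
  -- for result, answers in results.items(): for answer in user_answers: if answer in answers: match_counts[result] += 1
  -- (`+= 1` on an always-present key is `modify` with default 0)
  let match_counts :=
    resultsData.foldl
      (fun d p =>
        user_answers.foldl
          (fun d answer => if p.2.contains answer then d.modify p.1 0 (· + 1) else d) d)
      match_counts
  -- max_count = max(match_counts.values())  (values has the 4 entries, so max? is always some)
  let max_count := (PySem.List.max? match_counts.values (fun v => v)).getD 0
  -- [result for result, count in match_counts.items() if count == max_count]
  (match_counts.items.filter (fun q => q.2 == max_count)).map (·.1)

-- ===== PORT B =====
-- _ANSWER_TO_RESULT = {answer: result for result, answers in results.items() for answer in answers}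
def answerIndex : PySem.Dict String String :=
  resultsData.foldl (fun d p => p.2.foldl (fun d a => d.insert a p.1) d) PySem.Dict.empty

def determine_result_alt (user_answers : List String) : List String :=
  -- hits = [_ANSWER_TO_RESULT[a] for a in user_answers if a in _ANSWER_TO_RESULT]
  let hits := user_answers.filterMap (fun a => answerIndex.get? a)
  -- scores = [(name, hits.count(name)) for name in results]
  let scores := resultsData.map (fun p => (p.1, (hits.count p.1 : Int)))
  -- best = max(count for _, count in scores)  (scores nonempty, so max? is always some)
  let best := (PySem.List.max? (scores.map (·.2)) (fun v => v)).getD 0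
  -- [name for name, count in scores if count == best]
  (scores.filter (fun q => q.2 == best)).map (·.1)

-- ===== PRECONDITION & SPEC =====
def Spec_determine_result (user_answers : List String) (out : List String) : Prop := out = determine_result_alt user_answers
instance (user_answers : List String) (out : List String) : Decidable (Spec_determine_result user_answers out) := by unfold Spec_determine_result; infer_instance

-- ===== CLAIM (what is proved, stated in full; the proofs are below) =====
def Claim_equal_determine_result : Prop := ∀ (user_answers : List String), Dom_determine_result user_answers → Spec_determine_result user_answers (determine_result user_answers)

-- ===== LEMMAS AND PROOFS =====

-- the shape A's count dict always has
def mk4 (x y z w : Int) : PySem.Dict String Int :=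
  PySem.Dict.mk [("Elsa", x), ("Anna", y), ("Olaf", z), ("Kristoff", w)]

def cnt (ans ua : List String) : Int := (ua.countP (fun a => ans.contains a) : Int)

lemma bumpE (x y z w : Int) : (mk4 x y z w).modify "Elsa" 0 (· + 1) = mk4 (x + 1) y z w := by
  simp [mk4, pysem, PySem.Dict.modify, PySem.Dict.insert, PySem.Dict.getD, PySem.Dict.get?]

lemma bumpA (x y z w : Int) : (mk4 x y z w).modify "Anna" 0 (· + 1) = mk4 x (y + 1) z w := by
  simp [mk4, pysem, PySem.Dict.modify, PySem.Dict.insert, PySem.Dict.getD, PySem.Dict.get?]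

lemma bumpO (x y z w : Int) : (mk4 x y z w).modify "Olaf" 0 (· + 1) = mk4 x y (z + 1) w := by
  simp [mk4, pysem, PySem.Dict.modify, PySem.Dict.insert, PySem.Dict.getD, PySem.Dict.get?]

lemma bumpK (x y z w : Int) : (mk4 x y z w).modify "Kristoff" 0 (· + 1) = mk4 x y z (w + 1) := by
  simp [mk4, pysem, PySem.Dict.modify, PySem.Dict.insert, PySem.Dict.getD, PySem.Dict.get?]

lemma innerE : ∀ (ua : List String) (x y z w : Int),
    ua.foldl (fun d a => if ansE.contains a then d.modify "Elsa" 0 (· + 1) else d) (mk4 x y z w)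
      = mk4 (x + cnt ansE ua) y z w
  | [], x, y, z, w => by simp [cnt]
  | a :: t, x, y, z, w => by
      by_cases h : a ∈ ansE
      · rw [List.foldl_cons, if_pos (by simpa using h), bumpE, innerE t]
        simp [mk4, cnt, List.countP_cons, h]
        omega
      · rw [List.foldl_cons, if_neg (by simpa using h), innerE t]
        simp [mk4, cnt, List.countP_cons, h]

lemma innerA : ∀ (ua : List String) (x y z w : Int),
    ua.foldl (fun d a => if ansA.contains a then d.modify "Anna" 0 (· + 1) else d) (mk4 x y z w)
      = mk4 x (y + cnt ansA ua) z w
  | [], x, y, z, w => by simp [cnt]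
  | a :: t, x, y, z, w => by
      by_cases h : a ∈ ansA
      · rw [List.foldl_cons, if_pos (by simpa using h), bumpA, innerA t]
        simp [mk4, cnt, List.countP_cons, h]
        omega
      · rw [List.foldl_cons, if_neg (by simpa using h), innerA t]
        simp [mk4, cnt, List.countP_cons, h]

lemma innerO : ∀ (ua : List String) (x y z w : Int),
    ua.foldl (fun d a => if ansO.contains a then d.modify "Olaf" 0 (· + 1) else d) (mk4 x y z w)
      = mk4 x y (z + cnt ansO ua) w
  | [], x, y, z, w => by simp [cnt]
  | a :: t, x, y, z, w => by
      by_cases h : a ∈ ansO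
      · rw [List.foldl_cons, if_pos (by simpa using h), bumpO, innerO t]
        simp [mk4, cnt, List.countP_cons, h]
        omega
      · rw [List.foldl_cons, if_neg (by simpa using h), innerO t]
        simp [mk4, cnt, List.countP_cons, h]

lemma innerK : ∀ (ua : List String) (x y z w : Int),
    ua.foldl (fun d a => if ansK.contains a then d.modify "Kristoff" 0 (· + 1) else d) (mk4 x y z w)
      = mk4 x y z (w + cnt ansK ua)
  | [], x, y, z, w => by simp [cnt]
  | a :: t, x, y, z, w => by
      by_cases h : a ∈ ansK
      · rw [List.foldl_cons, if_pos (by simpa using h), bumpK, innerK t]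
        simp [mk4, cnt, List.countP_cons, h]
        omega
      · rw [List.foldl_cons, if_neg (by simpa using h), innerK t]
        simp [mk4, cnt, List.countP_cons, h]

-- A's count dict, characterised
lemma mcA_eq (ua : List String) :
    resultsData.foldl
      (fun d p =>
        ua.foldl (fun d answer => if p.2.contains answer then d.modify p.1 0 (· + 1) else d) d)
      (resultsData.foldl (fun d p => d.insert p.1 0) PySem.Dict.empty)
    = mk4 (cnt ansE ua) (cnt ansA ua) (cnt ansO ua) (cnt ansK ua) := by
  have h0 : resultsData.foldl (fun d p => d.insert p.1 0) PySem.Dict.empty = mk4 0 0 0 0 := by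
    decide
  rw [h0]
  simp only [resultsData, List.foldl_cons, List.foldl_nil]
  rw [innerE ua, innerA ua, innerO ua, innerK ua]
  simp

-- the reverse index, characterised
lemma idx_spec (a : String) :
    answerIndex.get? a =
      (if ansE.contains a then some "Elsa" else if ansA.contains a then some "Anna"
       else if ansO.contains a then some "Olaf" else if ansK.contains a then some "Kristoff"
       else none) := by
  by_cases h1 : a = "Building a snowman"; · subst h1; decide
  by_cases h2 : a = "Ice and snow powers like Elsa"; · subst h2; decide
  by_cases h3 : a = "Optimistic and curious like Anna"; · subst h3; decide
  by_cases h4 : a = "Let It Go from Frozen"; · subst h4; decide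
  by_cases h5 : a = "Playful and carefree like Olaf"; · subst h5; decide
  by_cases h6 : a = "Drinking hot cocoa"; · subst h6; decide
  by_cases h7 : a = "Loyal and dependable like Kristoff"; · subst h7; decide
  by_cases h8 : a = "Telekinesis like Violet from The Incredibles"; · subst h8; decide
  have hAI : answerIndex = PySem.Dict.mk
      [("Building a snowman", "Elsa"), ("Ice and snow powers like Elsa", "Elsa"),
       ("Optimistic and curious like Anna", "Anna"), ("Let It Go from Frozen", "Anna"),
       ("Playful and carefree like Olaf", "Olaf"), ("Drinking hot cocoa", "Olaf"),
       ("Loyal and dependable like Kristoff", "Kristoff"),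
       ("Telekinesis like Violet from The Incredibles", "Kristoff")] := by decide
  rw [hAI]
  simp [PySem.Dict.get?_mk_cons, PySem.Dict.get?, ansE, ansA, ansO, ansK,
    Ne.symm h1, Ne.symm h2, Ne.symm h3, Ne.symm h4, Ne.symm h5, Ne.symm h6, Ne.symm h7,
    Ne.symm h8, h1, h2, h3, h4, h5, h6, h7, h8]

lemma dEA (a : String) : a ∈ ansE → a ∈ ansA → False := by
  intro h1 h2; simp [ansE] at h1; simp [ansA] at h2
  rcases h1 with h|h <;> rcases h2 with h'|h' <;> subst h <;> simp_all

lemma dEO (a : String) : a ∈ ansE → a ∈ ansO → False := by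
  intro h1 h2; simp [ansE] at h1; simp [ansO] at h2
  rcases h1 with h|h <;> rcases h2 with h'|h' <;> subst h <;> simp_all

lemma dEK (a : String) : a ∈ ansE → a ∈ ansK → False := by
  intro h1 h2; simp [ansE] at h1; simp [ansK] at h2
  rcases h1 with h|h <;> rcases h2 with h'|h' <;> subst h <;> simp_all

lemma dAO (a : String) : a ∈ ansA → a ∈ ansO → False := by
  intro h1 h2; simp [ansA] at h1; simp [ansO] at h2
  rcases h1 with h|h <;> rcases h2 with h'|h' <;> subst h <;> simp_all

lemma dAK (a : String) : a ∈ ansA → a ∈ ansK → False := by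
  intro h1 h2; simp [ansA] at h1; simp [ansK] at h2
  rcases h1 with h|h <;> rcases h2 with h'|h' <;> subst h <;> simp_all

lemma dOK (a : String) : a ∈ ansO → a ∈ ansK → False := by
  intro h1 h2; simp [ansO] at h1; simp [ansK] at h2
  rcases h1 with h|h <;> rcases h2 with h'|h' <;> subst h <;> simp_all

lemma hits_cnt (ua : List String) :
    (((ua.filterMap (fun a => answerIndex.get? a)).count "Elsa" : Int) = cnt ansE ua)
    ∧ (((ua.filterMap (fun a => answerIndex.get? a)).count "Anna" : Int) = cnt ansA ua)
    ∧ (((ua.filterMap (fun a => answerIndex.get? a)).count "Olaf" : Int) = cnt ansO ua)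
    ∧ (((ua.filterMap (fun a => answerIndex.get? a)).count "Kristoff" : Int) = cnt ansK ua) := by
  induction ua with
  | nil => simp [cnt]
  | cons a t ih =>
    obtain ⟨iE, iA, iO, iK⟩ := ih
    rw [List.filterMap_cons, idx_spec a]
    by_cases hE : a ∈ ansE
    · have hA := fun h => dEA a hE h
      have hO := fun h => dEO a hE h
      have hK := fun h => dEK a hE h
      refine ⟨?_, ?_, ?_, ?_⟩ <;>
        simp [cnt, List.countP_cons, hE, hA, hO, hK, List.count_cons, iE, iA, iO, iK] <;> omega
    · by_cases hA : a ∈ ansA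
      · have hO := fun h => dAO a hA h
        have hK := fun h => dAK a hA h
        refine ⟨?_, ?_, ?_, ?_⟩ <;>
          simp [cnt, List.countP_cons, hE, hA, hO, hK, List.count_cons, iE, iA, iO, iK] <;> omega
      · by_cases hO : a ∈ ansO
        · have hK := fun h => dOK a hO h
          refine ⟨?_, ?_, ?_, ?_⟩ <;>
            simp [cnt, List.countP_cons, hE, hA, hO, hK, List.count_cons, iE, iA, iO, iK] <;>
              omega
        · by_cases hK : a ∈ ansK
          · refine ⟨?_, ?_, ?_, ?_⟩ <;>
              simp [cnt, List.countP_cons, hE, hA, hO, hK, List.count_cons, iE, iA, iO, iK]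
          · refine ⟨?_, ?_, ?_, ?_⟩ <;>
              simp [cnt, List.countP_cons, hE, hA, hO, hK, List.count_cons, iE, iA, iO, iK]

-- ===== VERDICT (by name: the statement is the Claim_ definition above) =====
theorem determine_result_spec : Claim_equal_determine_result := by
  intro ua _
  show determine_result ua = determine_result_alt ua
  unfold determine_result determine_result_alt
  simp only []
  rw [mcA_eq ua]
  obtain ⟨hE, hA, hO, hK⟩ := hits_cnt ua
  simp only [resultsData, List.map_cons, List.map_nil, hE, hA, hO, hK]
  rfl
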